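-- pv_equiv track=rewrite | github.com/asweigart/programmedpatterns | book/visualpatterns.py | pattern67
-- ===== SOURCE A (Python) =====
-- def pattern67(step):
--     width = 4
--     height = 3
--     for i in range(2, step + 1):
--         if i % 2 == 0:
--             width += 3
--         elif i % 2 == 1:
--             width += 2
--             height += 1
--     row = ('O' * width) + '\n'
--     pattern = row * height
--     return pattern
-- ===== SOURCE B (Python) =====
-- def pattern67(step):
--     # closed form: evens/odds = number of even/odd indices in range(2, step+1)
--     evens = max(0, step // 2)
--     odds = max(0, (step - 1) // 2)
--     width = 4 + 3 * evens + 2 * odds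
--     height = 3 + odds
--     return (('O' * width) + '\n') * height
-- ===== Notes on version B (the rewrite author's own statement) =====
-- stated objective: simpler
-- what changed: Replaces the accumulation loop over the index range with closed-form counts of even and odd loop indices (floor divisions clamped at zero), computing width and height directly.
import Mathlib
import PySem

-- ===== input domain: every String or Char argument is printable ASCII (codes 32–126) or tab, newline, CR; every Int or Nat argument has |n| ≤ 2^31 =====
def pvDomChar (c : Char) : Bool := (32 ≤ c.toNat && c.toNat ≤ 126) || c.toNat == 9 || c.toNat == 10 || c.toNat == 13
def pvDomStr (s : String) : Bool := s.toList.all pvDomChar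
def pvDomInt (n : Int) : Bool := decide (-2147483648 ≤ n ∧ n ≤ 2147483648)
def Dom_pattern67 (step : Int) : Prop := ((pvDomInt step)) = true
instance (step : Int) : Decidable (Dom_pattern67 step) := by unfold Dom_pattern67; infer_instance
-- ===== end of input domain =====

-- B computes the loop-accumulated width/height in closed form (counts of even/odd indices in range(2, step+1)) — simpler, no loop for the dimensions.


-- ===== PORT A =====
-- A's loop body: 'if i % 2 == 0: width += 3  elif i % 2 == 1: width += 2; height += 1'
def pvBody67 (wh : Int × Int) (i : Int) : Int × Int :=
  if PySem.Int.mod i 2 = 0 then (wh.1 + 3, wh.2)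
  else if PySem.Int.mod i 2 = 1 then (wh.1 + 2, wh.2 + 1)
  else wh

def pattern67 (step : Int) : String :=
  let wh := (PySem.List.pyRange 2 (step + 1) 1).foldl pvBody67 (4, 3)
  let row := PySem.List.pyRepeat ['O'] wh.1 ++ ['\n']
  String.ofList (PySem.List.pyRepeat row wh.2)

-- ===== PORT B =====
def pattern67_alt (step : Int) : String :=
  let evens := max 0 (PySem.Int.floordiv step 2)
  let odds := max 0 (PySem.Int.floordiv (step - 1) 2)
  let width := 4 + 3 * evens + 2 * odds
  let height := 3 + odds
  String.ofList (PySem.List.pyRepeat (PySem.List.pyRepeat ['O'] width ++ ['\n']) height)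

-- ===== PRECONDITION & SPEC =====
def Spec_pattern67 (step : Int) (out : String) : Prop := out = pattern67_alt step
instance (step : Int) (out : String) : Decidable (Spec_pattern67 step out) := by unfold Spec_pattern67; infer_instance

-- ===== CLAIM (what is proved, stated in full; the proofs are below) =====
def Claim_equal_pattern67 : Prop := ∀ (step : Int), Dom_pattern67 step → Spec_pattern67 step (pattern67 step)

-- ===== LEMMAS AND PROOFS =====

-- closed form of A's loop for step = m + 1 (m ≥ 0)
lemma pvLoop67 (m : Nat) :
    (PySem.List.pyRange 2 ((m : Int) + 2) 1).foldl pvBody67 (4, 3)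
      = (4 + 3 * (((m + 1) / 2 : Nat) : Int) + 2 * ((m / 2 : Nat) : Int),
         3 + ((m / 2 : Nat) : Int)) := by
  induction m with
  | zero => simp [PySem.List.pyRange_one_eq_nil]
  | succ k ih =>
    have hrange : PySem.List.pyRange 2 (((k + 1 : Nat) : Int) + 2) 1
        = PySem.List.pyRange 2 ((k : Int) + 2) 1 ++ [(k : Int) + 2] := by
      rw [show (((k + 1 : Nat) : Int)) + 2 = (((k : Nat) : Int) + 2) + 1 by push_cast; ring]
      exact PySem.List.pyRange_one_succ_right (by omega)
    rw [hrange, List.foldl_append, ih]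
    simp only [List.foldl_cons, List.foldl_nil, pvBody67]
    rw [PySem.Int.mod_eq_emod_of_pos (by omega)]
    rcases Nat.even_or_odd k with he | ho
    · obtain ⟨j, hj⟩ := he
      have hmod : ((k : Int) + 2) % 2 = 0 := by omega
      simp only [hmod, if_true]
      rw [Prod.mk.injEq]
      constructor <;> (push_cast; omega)
    · obtain ⟨j, hj⟩ := ho
      have hmod : ((k : Int) + 2) % 2 = 1 := by omega
      rw [hmod]
      simp only [if_neg (by omega : (1:Int) ≠ 0), if_true]
      rw [Prod.mk.injEq]
      constructor <;> (push_cast; omega)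

-- ===== VERDICT (by name: the statement is the Claim_ definition above) =====
theorem pattern67_spec : Claim_equal_pattern67 := by
  intro step _
  show pattern67 step = pattern67_alt step
  unfold pattern67 pattern67_alt
  rw [PySem.Int.floordiv_eq_ediv_of_pos (by omega),
      PySem.Int.floordiv_eq_ediv_of_pos (by omega)]
  by_cases hs : step ≤ 1
  · rw [PySem.List.pyRange_one_eq_nil (by omega)]
    have h1 : max 0 (step / 2) = 0 := by omega
    have h2 : max 0 ((step - 1) / 2) = 0 := by omega
    rw [h1, h2]
    norm_num
  · rw [not_le] at hs
    obtain ⟨m, hm⟩ : ∃ m : Nat, step = (m : Int) + 1 := ⟨(step - 1).toNat, by omega⟩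
    subst hm
    rw [show ((m : Int) + 1) + 1 = (m : Int) + 2 by ring, pvLoop67 m]
    have he : max 0 (((m : Int) + 1) / 2) = (((m + 1) / 2 : Nat) : Int) := by
      push_cast; omega
    have ho : max 0 ((((m : Int) + 1) - 1) / 2) = ((m / 2 : Nat) : Int) := by
      push_cast; omega
    rw [he, ho]
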